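-- pv_equiv track=rewrite | github.com/maipatana/maipatana_flask_blog | __init__.py | pagenum
-- ===== SOURCE A (Python) =====
-- def pagenum(totalposts, postperpage):
--     pages = [1]
--     num = 2
--     while totalposts > postperpage:
--         pages.append(num)
--         totalposts -= postperpage
--         num += 1
--     return pages
-- ===== SOURCE B (Python) =====
-- def pagenum(totalposts, postperpage):
--     n = max(1, -(-totalposts // postperpage))
--     return list(range(1, n + 1))
-- ===== Notes on version B (the rewrite author's own statement) =====
-- stated objective: simpler
-- what changed: B computes the page count in closed form as max(1, ceil(totalposts/postperpage)) and materializes it with range(), instead of A's while-loop of repeated subtraction appending one number per page.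
-- outside the precondition, e.g. on pagenum(-5, -2): A returns [1], B returns [1, 2, 3]
import Mathlib
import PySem

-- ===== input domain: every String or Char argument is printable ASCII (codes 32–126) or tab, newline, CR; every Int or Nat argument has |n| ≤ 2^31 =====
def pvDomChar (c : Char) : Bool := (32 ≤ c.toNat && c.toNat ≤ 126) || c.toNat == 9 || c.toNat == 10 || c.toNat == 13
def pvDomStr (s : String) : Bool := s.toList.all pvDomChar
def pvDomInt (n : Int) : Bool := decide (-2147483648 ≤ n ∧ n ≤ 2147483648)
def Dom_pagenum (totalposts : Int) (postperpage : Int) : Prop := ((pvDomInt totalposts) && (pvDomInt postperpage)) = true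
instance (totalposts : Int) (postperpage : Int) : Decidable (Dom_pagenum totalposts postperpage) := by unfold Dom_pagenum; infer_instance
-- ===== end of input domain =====

-- B replaces A's repeated-subtraction while-loop by a closed-form page count
-- max(1, ceil(totalposts/postperpage)) materialized with range(): simpler, no accumulator loop.


-- ===== PORT A =====
-- the while loop; the inner 'hp' guard only makes the diverging case (postperpage ≤ 0,
-- excluded by Pre_) total, it adds no algorithm
def pagenumLoop (totalposts postperpage num : Int) (pages : List Int) : List Int :=
  if _h : totalposts > postperpage then
    if hp : 0 < postperpage then
      pagenumLoop (totalposts - postperpage) postperpage (num + 1) (pages ++ [num])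
    else pages
  else pages
termination_by totalposts.toNat
decreasing_by omega

def pagenum (totalposts : Int) (postperpage : Int) : List Int :=
  pagenumLoop totalposts postperpage 2 [1]

-- ===== PORT B =====
def pagenum_alt (totalposts : Int) (postperpage : Int) : List Int :=
  let n := max 1 (-(PySem.Int.floordiv (-totalposts) postperpage))
  PySem.List.pyRange 1 (n + 1) 1

-- ===== PRECONDITION & SPEC =====
-- Pre_ restricts to the natural domain postperpage ≥ 1: for postperpage ≤ 0 A's loop
-- diverges whenever totalposts > postperpage, and where it does return (totalposts ≤
-- postperpage ≤ 0) the value [1] is an accident of the loop never running, while B's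
-- ceiling division gives its own value; neither is specified for a non-positive page size.
def Pre_pagenum (totalposts : Int) (postperpage : Int) : Prop := 1 ≤ postperpage
instance (totalposts : Int) (postperpage : Int) : Decidable (Pre_pagenum totalposts postperpage) := by unfold Pre_pagenum; infer_instance

def pvWitness_pagenum : Int × Int := (13, 5)

def Spec_pagenum (totalposts : Int) (postperpage : Int) (out : List Int) : Prop := out = pagenum_alt totalposts postperpage
instance (totalposts : Int) (postperpage : Int) (out : List Int) : Decidable (Spec_pagenum totalposts postperpage out) := by unfold Spec_pagenum; infer_instance

-- ===== CLAIM (what is proved, stated in full; the proofs are below) =====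
def Claim_equal_pagenum : Prop := ∀ (totalposts : Int) (postperpage : Int), Dom_pagenum totalposts postperpage → Pre_pagenum totalposts postperpage → Spec_pagenum totalposts postperpage (pagenum totalposts postperpage)

-- ===== LEMMAS AND PROOFS =====

-- abbreviation used only in the proofs: the ceiling quotient ⌈tp/pp⌉
def pvCeil (tp pp : Int) : Int := -(PySem.Int.floordiv (-tp) pp)

theorem pvCeil_le_one {tp pp : Int} (hpp : 0 < pp) (h : tp ≤ pp) : pvCeil tp pp ≤ 1 := by
  have hq := (PySem.Int.neg_floordiv_neg_eq_iff_of_pos (a := tp) (q := pvCeil tp pp) hpp).mp (by unfold pvCeil; rfl)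
  nlinarith [hq.1, hq.2]

theorem pvCeil_ge_two {tp pp : Int} (hpp : 0 < pp) (h : pp < tp) : 2 ≤ pvCeil tp pp := by
  have hq := (PySem.Int.neg_floordiv_neg_eq_iff_of_pos (a := tp) (q := pvCeil tp pp) hpp).mp (by unfold pvCeil; rfl)
  nlinarith [hq.1, hq.2]

theorem pvCeil_sub {tp pp : Int} (hpp : 0 < pp) (h : pp < tp) :
    pvCeil (tp - pp) pp = pvCeil tp pp - 1 := by
  have hq := (PySem.Int.neg_floordiv_neg_eq_iff_of_pos (a := tp) (q := pvCeil tp pp) hpp).mp (by unfold pvCeil; rfl)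
  have := (PySem.Int.neg_floordiv_neg_eq_iff_of_pos (a := tp - pp) (q := pvCeil tp pp - 1) hpp).mpr
    ⟨by linarith [hq.1], by linarith [hq.2]⟩
  exact this

theorem pagenumLoop_eq (pp : Int) (hpp : 0 < pp) :
    ∀ (tp num : Int) (pages : List Int),
      pagenumLoop tp pp num pages =
        pages ++ PySem.List.pyRange num (num + (max 1 (pvCeil tp pp) - 1)) 1 := by
  suffices h : ∀ (n : Nat) (tp : Int), tp.toNat = n → ∀ (num : Int) (pages : List Int),
      pagenumLoop tp pp num pages =
        pages ++ PySem.List.pyRange num (num + (max 1 (pvCeil tp pp) - 1)) 1 by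
    intro tp num pages; exact h tp.toNat tp rfl num pages
  intro n
  induction n using Nat.strong_induction_on with
  | _ n ih => ?_
  intro tp htn num pages
  by_cases h : tp > pp
  · rw [pagenumLoop]
    simp only [h, hpp, dif_pos]
    have h2 : 2 ≤ pvCeil tp pp := pvCeil_ge_two hpp h
    rw [ih (tp - pp).toNat (by omega) (tp - pp) rfl]
    rw [pvCeil_sub hpp h]
    have hm1 : max 1 (pvCeil tp pp - 1) = pvCeil tp pp - 1 := by omega
    have hm2 : max 1 (pvCeil tp pp) = pvCeil tp pp := by omega
    rw [hm1, hm2, List.append_assoc]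
    congr 1
    rw [PySem.List.pyRange_one_cons (by omega : num < num + (pvCeil tp pp - 1))]
    have : num + 1 + (pvCeil tp pp - 1 - 1) = num + (pvCeil tp pp - 1) := by omega
    rw [this]
    rfl
  · rw [pagenumLoop]
    simp only [h, dif_neg, not_false_iff]
    have h1 : pvCeil tp pp ≤ 1 := pvCeil_le_one hpp (by omega)
    have hm : max 1 (pvCeil tp pp) = 1 := by omega
    rw [hm]
    rw [PySem.List.pyRange_one_eq_nil (by omega), List.append_nil]

-- ===== VERDICT (by name: the statement is the Claim_ definition above) =====
theorem pagenum_spec : Claim_equal_pagenum := by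
  intro tp pp _ hpre
  unfold Spec_pagenum pagenum pagenum_alt
  rw [pagenumLoop_eq pp (by exact hpre) tp 2 [1]]
  show [1] ++ _ = PySem.List.pyRange 1 (max 1 (pvCeil tp pp) + 1) 1
  have h1 : (1:Int) ≤ max 1 (pvCeil tp pp) := le_max_left _ _
  rw [PySem.List.pyRange_one_cons (by omega : (1:Int) < max 1 (pvCeil tp pp) + 1)]
  simp only [List.singleton_append, List.cons.injEq, true_and]
  congr 1
  omega
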